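-- pv_equiv track=rewrite | github.com/feigi/diagram-update | src/diagram_update/skeleton.py | _truncate_to_chars
-- ===== SOURCE A (Python) =====
-- def _truncate_to_chars(text: str, max_chars: int) -> tuple[str, bool]:
--     """Truncate text to fit within a character budget.
--
--     Truncates at line boundaries to avoid cutting mid-line.
--     Returns a tuple of (truncated_text, was_truncated).
--     """
--     if len(text) <= max_chars:
--         return text, False
--
--     # Truncate at line boundaries
--     lines = text.split("\n")
--     result_lines: list[str] = []
--     char_count = 0
--     for line in lines:
--         # Account for newline character between lines
--         line_chars = len(line) + (1 if result_lines else 0)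
--         if char_count + line_chars > max_chars and result_lines:
--             break
--         result_lines.append(line)
--         char_count += line_chars
--
--     return "\n".join(result_lines), True
-- ===== SOURCE B (Python) =====
-- def _truncate_to_chars(text: str, max_chars: int) -> tuple[str, bool]:
--     """Truncate text at line boundaries within a character budget."""
--     if len(text) <= max_chars:
--         return text, False
--     # Offset of the end of the first line (always kept).
--     end = text.find("\n")
--     if end == -1:
--         end = len(text)
--     # Extend line by line: a following newline at offset nxt means the text
--     # up to nxt still fits iff nxt <= max_chars.
--     while True:
--         nxt = text.find("\n", end + 1)
--         if nxt == -1 or nxt > max_chars: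
--             break
--         end = nxt
--     return text[:end], True
-- ===== Notes on version B (the rewrite author's own statement) =====
-- stated objective: simpler
-- what changed: B keeps the length early-return but replaces A's split-into-lines / per-line accumulation with newline bookkeeping / re-join by maintaining one absolute character offset advanced with str.find and slicing the text once.
import Mathlib
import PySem

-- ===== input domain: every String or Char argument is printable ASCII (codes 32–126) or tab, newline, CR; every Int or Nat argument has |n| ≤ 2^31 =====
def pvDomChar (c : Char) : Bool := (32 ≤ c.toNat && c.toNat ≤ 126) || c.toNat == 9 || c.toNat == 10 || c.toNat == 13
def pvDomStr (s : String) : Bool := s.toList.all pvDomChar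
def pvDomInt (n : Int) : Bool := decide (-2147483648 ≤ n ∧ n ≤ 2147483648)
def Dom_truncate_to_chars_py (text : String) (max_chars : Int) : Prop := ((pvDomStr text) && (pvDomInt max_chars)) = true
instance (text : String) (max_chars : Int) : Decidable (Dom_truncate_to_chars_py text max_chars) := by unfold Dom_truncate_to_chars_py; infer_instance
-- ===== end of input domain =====

-- B replaces A's split-into-lines / accumulate / re-join by a single absolute character
-- offset advanced with str.find, slicing the text once (objective: simpler).

-- ===== PORT A =====
-- A's for-loop over the split lines, with result_lines, char_count and break, transliterated
def truncAL (max_chars : Int) : List (List Char) → List (List Char) → Int → List (List Char)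
  | [], result_lines, _ => result_lines
  | line :: rest, result_lines, char_count =>
      let line_chars : Int := (line.length : Int) + (if result_lines.isEmpty then 0 else 1)
      if max_chars < char_count + line_chars ∧ ¬ result_lines.isEmpty then result_lines
      else truncAL max_chars rest (result_lines ++ [line]) (char_count + line_chars)

def truncate_to_chars_py (text : String) (max_chars : Int) : String × Bool :=
  if PySem.Str.len text ≤ max_chars then (text, false)
  else
    let lines := PySem.Chars.splitOn text.toList ['\n']
    (String.ofList (PySem.Chars.join ['\n'] (truncAL max_chars lines [] 0)), true)

-- ===== PORT B =====
-- B's while-True loop: end := nxt until nxt == -1 or nxt > max_chars.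
-- Structural recursion on a fuel counter; fuel length+1 is enough since each found
-- newline offset strictly increases and stays ≤ length, so the loop is never cut short.
def truncBL (cs : List Char) (max_chars : Int) : Nat → Nat → Nat
  | 0, e => e
  | fuel + 1, e =>
      let nxt := PySem.Chars.findFrom cs ['\n'] ((e : Int) + 1)
      if nxt = -1 ∨ max_chars < nxt then e
      else truncBL cs max_chars fuel nxt.toNat

def truncate_to_chars_py_alt (text : String) (max_chars : Int) : String × Bool :=
  if PySem.Str.len text ≤ max_chars then (text, false)
  else
    let cs := text.toList
    let f := PySem.Chars.find cs ['\n']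
    let e : Nat := if f = -1 then cs.length else f.toNat
    (String.ofList (cs.take (truncBL cs max_chars (cs.length + 1) e)), true)

-- ===== PRECONDITION & SPEC =====
def Spec_truncate_to_chars_py (text : String) (max_chars : Int) (out : String × Bool) : Prop := out = truncate_to_chars_py_alt text max_chars
instance (text : String) (max_chars : Int) (out : String × Bool) : Decidable (Spec_truncate_to_chars_py text max_chars out) := by unfold Spec_truncate_to_chars_py; infer_instance

-- ===== CLAIM (what is proved, stated in full; the proofs are below) =====
def Claim_equal_truncate_to_chars_py : Prop := ∀ (text : String) (max_chars : Int), Dom_truncate_to_chars_py text max_chars → Spec_truncate_to_chars_py text max_chars (truncate_to_chars_py text max_chars)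

-- ===== LEMMAS AND PROOFS =====

-- a fuel-free model of splitting on '\n'
def mySplit (pre : List Char) : List Char → List (List Char)
  | [] => [pre]
  | c :: r => if c = '\n' then pre :: mySplit [] r else mySplit (pre ++ [c]) r

-- the text that follows the lines already kept: a '\n' before each remaining line
def nlJoinTail : List (List Char) → List Char
  | [] => []
  | l :: ls => '\n' :: (l ++ nlJoinTail ls)

theorem splitOn_go_eq (fuel : Nat) : ∀ (l cur : List Char) (accs : List (List Char)),
    l.length ≤ fuel →
    PySem.Chars.splitOn.go ['\n'] fuel l cur accs = accs.reverse ++ mySplit cur.reverse l := by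
  induction fuel with
  | zero =>
    intro l cur accs h
    have : l = [] := by cases l <;> simp_all
    subst this
    simp [PySem.Chars.splitOn.go, mySplit]
  | succ n ih =>
    intro l cur accs h
    cases l with
    | nil => simp [PySem.Chars.splitOn.go, mySplit]
    | cons c rest =>
      rw [PySem.Chars.splitOn.go.eq_def]
      simp only [List.isPrefixOf]
      by_cases hc : c = '\n'
      · subst hc
        simp only [beq_self_eq_true, Bool.true_and, if_pos, List.length_cons,
          List.length_nil, List.drop_succ_cons, List.drop_zero]
        rw [ih rest [] (cur.reverse :: accs) (by simpa using h)]
        simp [mySplit]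
      · rw [if_neg (by simp; intro h'; exact absurd h'.symm hc)]
        rw [ih rest (c :: cur) accs (by simpa using h)]
        simp [mySplit, hc]

theorem splitOn_eq_mySplit (cs : List Char) :
    PySem.Chars.splitOn cs ['\n'] = mySplit [] cs := by
  unfold PySem.Chars.splitOn
  rw [splitOn_go_eq (cs.length + 1) cs [] [] (by omega)]
  simp

theorem mySplit_spec : ∀ (cs pre : List Char), '\n' ∉ pre →
    ∃ l0 ls, mySplit pre cs = l0 :: ls ∧ pre ++ cs = l0 ++ nlJoinTail ls ∧
      '\n' ∉ l0 ∧ ∀ l ∈ ls, '\n' ∉ l := by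
  intro cs
  induction cs with
  | nil => intro pre hp; exact ⟨pre, [], by simp [mySplit, nlJoinTail, hp]⟩
  | cons c r ih =>
    intro pre hp
    by_cases hc : c = '\n'
    · subst hc
      obtain ⟨l0, ls, h1, h2, h3, h4⟩ := ih [] (by simp)
      refine ⟨pre, l0 :: ls, by simp [mySplit, h1], ?_, hp, ?_⟩
      · simp only [nlJoinTail]; simp at h2; simp [h2]
      · intro l hl
        rw [List.mem_cons] at hl
        rcases hl with rfl | hmem
        · exact h3
        · exact h4 l hmem
    · obtain ⟨l0, ls, h1, h2, h3, h4⟩ := ih (pre ++ [c]) (by simp [hp]; intro h; exact hc h.symm)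
      refine ⟨l0, ls, by simp [mySplit, hc, h1], by simpa using h2, h3, h4⟩

theorem singleton_prefix_head {xs : List Char} :
    ['\n'] <+: xs ↔ xs.head? = some '\n' := by
  cases xs with
  | nil => simp
  | cons a t =>
    constructor
    · rintro ⟨u, hu⟩; simp at hu; simp [hu.1.symm]
    · intro h; simp at h; exact ⟨t, by simp [h]⟩

theorem find_no_nl (l : List Char) (h : '\n' ∉ l) : PySem.Chars.find l ['\n'] = -1 := by
  rw [PySem.Chars.find_eq_neg_one_iff]
  intro hinf
  exact h (List.singleton_sublist.mp hinf.sublist)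

theorem find_first_nl (l r : List Char) (h : '\n' ∉ l) :
    PySem.Chars.find (l ++ '\n' :: r) ['\n'] = (l.length : Int) := by
  set s := l ++ '\n' :: r with hs
  have hmem : '\n' ∈ s := by simp [hs]
  have hnn : 0 ≤ PySem.Chars.find s ['\n'] := by
    rw [PySem.Chars.find_nonneg_iff]
    exact (List.singleton_infix_iff '\n' s).mpr hmem
  obtain ⟨hpre, hmin⟩ := PySem.Chars.find_spec hnn
  set k := (PySem.Chars.find s ['\n']).toNat with hk
  have hkk : PySem.Chars.find s ['\n'] = (k : Int) := by omega
  rw [hkk]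
  congr 1
  by_contra hne
  rcases Nat.lt_or_ge k l.length with hlt | hge
  · -- prefix at k means s[k] = '\n' but s[k] = l[k] ∈ l
    have : s[k]? = some '\n' := by
      rw [← List.head?_drop]; exact singleton_prefix_head.mp hpre
    rw [hs, List.getElem?_append_left hlt] at this
    exact h (List.mem_of_getElem? this)
  · have hlt : l.length < k := by omega
    have : ['\n'] <+: List.drop l.length s := by
      rw [hs, List.drop_left]; exact ⟨r, rfl⟩
    exact hmin l.length hlt this

theorem findFrom_past (s : List Char) (k : Nat) (h : s.length < k) :
    PySem.Chars.findFrom s ['\n'] (k : Int) = -1 := by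
  unfold PySem.Chars.findFrom
  simp only
  rw [if_pos]
  split <;> omega

theorem intercalate_cons2 (a b : List Char) (t : List (List Char)) :
    List.intercalate ['\n'] (a :: b :: t) = a ++ '\n' :: List.intercalate ['\n'] (b :: t) := by
  simp [List.intercalate, List.intersperse]

theorem intercalate_append_singleton (acc : List (List Char)) (l : List Char) (h : acc ≠ []) :
    List.intercalate ['\n'] (acc ++ [l]) = List.intercalate ['\n'] acc ++ '\n' :: l := by
  induction acc with
  | nil => exact absurd rfl h
  | cons a t ih =>
    cases t with
    | nil => simp [List.intercalate]
    | cons b t' =>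
      have hih := ih (by simp)
      simp only [List.cons_append] at hih ⊢
      rw [intercalate_cons2, intercalate_cons2, hih]
      simp

theorem truncAL_cons_step (max_chars : Int) (l : List Char) (ls acc : List (List Char))
    (cc : Int) (h : acc.isEmpty = false) :
    truncAL max_chars (l :: ls) acc cc =
      if max_chars < cc + ((l.length : Int) + 1) then acc
      else truncAL max_chars ls (acc ++ [l]) (cc + ((l.length : Int) + 1)) := by
  simp [truncAL, h]

theorem trunc_main (cs : List Char) (max_chars : Int) (hlen : max_chars < (cs.length : Int)) :
    ∀ (ls acc : List (List Char)) (e fuel : Nat), acc ≠ [] →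
    cs.length + 1 - e ≤ fuel →
    List.intercalate ['\n'] acc = cs.take e →
    cs.drop e = nlJoinTail ls →
    (∀ l ∈ ls, '\n' ∉ l) →
    List.intercalate ['\n'] (truncAL max_chars ls acc (e : Int)) = cs.take (truncBL cs max_chars fuel e) := by
  intro ls
  induction ls with
  | nil =>
    intro acc e fuel hacc hfuel hja hdr _
    have he : cs.length ≤ e := List.drop_eq_nil_iff.mp (by simpa [nlJoinTail] using hdr)
    have hnxt : PySem.Chars.findFrom cs ['\n'] ((e : Int) + 1) = -1 := by
      have := findFrom_past cs (e + 1) (by omega)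
      rwa [Nat.cast_add, Nat.cast_one] at this
    cases fuel with
    | zero => simpa [truncAL, truncBL] using hja
    | succ f =>
      simp only [truncBL, hnxt, true_or, if_pos]
      simpa [truncAL] using hja
  | cons l ls' ih =>
    intro acc e fuel hacc hfuel hja hdr hnl
    have hne : acc.isEmpty = false := by simpa using hacc
    have he : e < cs.length := by
      by_contra hcon
      rw [List.drop_eq_nil_of_le (by omega)] at hdr
      simp [nlJoinTail] at hdr
    have hdr1 : cs.drop (e + 1) = l ++ nlJoinTail ls' := by
      have : cs.drop (e + 1) = (cs.drop e).drop 1 := by rw [List.drop_drop]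
      rw [this, hdr]; simp [nlJoinTail]
    have hlend : (cs.drop e).length = cs.length - e := List.length_drop
    have hlen2 : cs.length = e + 1 + l.length + (nlJoinTail ls').length := by
      rw [hdr] at hlend; simp [nlJoinTail] at hlend; omega
    have hcast : ((e : Int) + 1) = (((e + 1 : Nat)) : Int) := by push_cast; ring
    have hnl_l : '\n' ∉ l := hnl l List.mem_cons_self
    obtain ⟨f, rfl⟩ : ∃ f, fuel = f + 1 := ⟨fuel - 1, by omega⟩
    simp only [truncBL]
    simp only [hcast]
    rw [PySem.Chars.findFrom_natCast cs ['\n'] (e + 1) (by omega), hdr1]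
    cases ls' with
    | nil =>
      have hf : PySem.Chars.find (l ++ nlJoinTail []) ['\n'] = -1 := by
        simpa [nlJoinTail] using find_no_nl l hnl_l
      simp only [hf, true_or, if_pos]
      have hcond : max_chars < (e : Int) + ((l.length : Int) + 1) := by
        simp [nlJoinTail] at hlen2
        omega
      simp only [truncAL, hne, Bool.not_eq_true]
      rw [if_pos ⟨by simpa using hcond, by simp⟩]
      exact hja
    | cons l2 ls'' =>
      have hf : PySem.Chars.find (l ++ nlJoinTail (l2 :: ls'')) ['\n'] = (l.length : Int) := by
        simpa [nlJoinTail] using find_first_nl l (l2 ++ nlJoinTail ls'') hnl_l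
      simp only [hf]
      rw [if_neg (by omega : ¬ ((l.length : Int) = -1))]
      rw [truncAL_cons_step max_chars l (l2 :: ls'') acc (e : Int) hne]
      by_cases hmax : max_chars < (e : Int) + ((l.length : Int) + 1)
      · rw [if_pos hmax, if_pos (Or.inr (by push_cast at hmax ⊢; omega))]
        exact hja
      · rw [if_neg hmax, if_neg (by push_cast at hmax ⊢; omega)]
        have htn : ((((e+1:Nat)):Int) + (l.length : Int)).toNat = e + 1 + l.length := by
          push_cast; omega
        rw [htn]
        have harg : (e : Int) + ((l.length : Int) + 1) = ((e + 1 + l.length : Nat) : Int) := by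
          push_cast; ring
        rw [harg]
        apply ih (acc ++ [l]) (e + 1 + l.length) f (by simp) (by omega)
        · rw [intercalate_append_singleton acc l hacc, hja]
          have h13 : e + 1 + l.length = e + (1 + l.length) := by omega
          rw [h13, List.take_add, hdr]
          simp only [nlJoinTail]
          rw [Nat.add_comm 1 l.length, List.take_succ_cons, List.take_left]
        · have h14 : cs.drop (e + 1 + l.length) = (cs.drop (e+1)).drop l.length := by
            rw [List.drop_drop]
          rw [h14, hdr1, List.drop_left]
        · intro x hx; exact hnl x (List.mem_cons_of_mem l hx)

theorem intercalate_single (l : List Char) : List.intercalate ['\n'] [l] = l := by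
  simp [List.intercalate]

-- ===== VERDICT (by name: the statement is the Claim_ definition above) =====
theorem truncate_to_chars_py_spec : Claim_equal_truncate_to_chars_py := by
  unfold Claim_equal_truncate_to_chars_py
  intro text max_chars _
  unfold Spec_truncate_to_chars_py truncate_to_chars_py truncate_to_chars_py_alt
  by_cases h : PySem.Str.len text ≤ max_chars
  · rw [if_pos h, if_pos h]
  · rw [if_neg h, if_neg h]
    have hlen : max_chars < (text.toList.length : Int) := by
      unfold PySem.Str.len at h; omega
    obtain ⟨l0, ls, h1, h2, h3, h4⟩ := mySplit_spec text.toList [] (by simp)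
    have hcs2 : text.toList = l0 ++ nlJoinTail ls := by simpa using h2
    have hA1 : truncAL max_chars (l0 :: ls) [] 0 = truncAL max_chars ls [l0] ((l0.length : Int)) := by
      simp [truncAL]
    have he0 : (if PySem.Chars.find text.toList ['\n'] = -1 then text.toList.length
        else (PySem.Chars.find text.toList ['\n']).toNat) = l0.length := by
      cases ls with
      | nil =>
        have hc : text.toList = l0 := by simpa [nlJoinTail] using hcs2
        rw [hc, find_no_nl l0 h3, if_pos rfl]
      | cons l2 ls' =>
        have hf : PySem.Chars.find text.toList ['\n'] = (l0.length : Int) := by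
          rw [hcs2]
          simpa [nlJoinTail] using find_first_nl l0 (l2 ++ nlJoinTail ls') h3
        rw [hf, if_neg (by omega), Int.toNat_natCast]
    have hmain := trunc_main text.toList max_chars hlen ls [l0] l0.length
      (text.toList.length + 1) (by simp) (by omega)
      (by rw [intercalate_single, hcs2, List.take_left])
      (by rw [hcs2, List.drop_left]) h4
    simp only [splitOn_eq_mySplit, h1, he0, hA1, PySem.Chars.join]
    rw [hmain]
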